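-- pv_equiv track=rewrite | github.com/cindylui479-create/MdtoPdf | preprocess.py | fix_title_blockquotes
-- ===== SOURCE A (Python) =====
-- def fix_title_blockquotes(content: str) -> str:
--     """Convert leading blockquotes (used as subtitles) to bold text."""
--     lines = content.split('\n')
--     result = []
--     in_header = True  # Only process blockquotes near the top
--
--     for i, line in enumerate(lines):
--         if in_header and line.startswith('> '):
--             # Convert blockquote to bold paragraph
--             text = line[2:].strip()
--             result.append(f'**{text}**\n')
--         else:
--             if line.startswith('#'):
--                 in_header = False
--             result.append(line)
--
--     return '\n'.join(result)
-- ===== SOURCE B (Python) =====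
-- def fix_title_blockquotes(content: str) -> str:
--     """Convert leading blockquotes (used as subtitles) to bold text."""
--     lines = content.split('\n')
--     idx = next((i for i, l in enumerate(lines) if l.startswith('#')), len(lines))
--     head = [f'**{l[2:].strip()}**\n' if l.startswith('> ') else l
--             for l in lines[:idx]]
--     return '\n'.join(head + lines[idx:])
-- ===== Notes on version B (the rewrite author's own statement) =====
-- stated objective: simpler
-- what changed: Replaces the running in_header flag loop by first locating the first '#' heading line and then converting only that prefix with a comprehension, appending the suffix unchanged.
import Mathlib
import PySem

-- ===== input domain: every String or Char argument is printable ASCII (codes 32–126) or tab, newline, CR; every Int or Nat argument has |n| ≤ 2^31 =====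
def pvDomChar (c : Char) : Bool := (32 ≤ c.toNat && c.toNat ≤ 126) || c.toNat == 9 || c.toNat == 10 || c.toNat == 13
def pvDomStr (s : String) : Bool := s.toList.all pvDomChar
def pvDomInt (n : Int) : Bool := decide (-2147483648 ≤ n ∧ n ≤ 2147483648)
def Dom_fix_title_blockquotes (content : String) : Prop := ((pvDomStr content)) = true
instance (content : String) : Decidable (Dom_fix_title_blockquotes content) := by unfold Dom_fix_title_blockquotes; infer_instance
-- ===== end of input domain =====

-- B replaces A's running in_header flag by locating the first '#' heading line and
-- converting only the prefix before it (objective: simpler decomposition).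

-- ===== PORT A =====
-- the loop body of A ('for i, line in enumerate(lines)'; the index i is unused)
def pvStepA (st : Bool × List String) (line : String) : Bool × List String :=
  if st.1 && PySem.Str.startswith line "> " then
    (st.1, st.2 ++ ["**" ++ PySem.Str.strip (PySem.Str.slice line (some 2) none) ++ "**\n"])
  else
    (if PySem.Str.startswith line "#" then false else st.1, st.2 ++ [line])

def fix_title_blockquotes (content : String) : String :=
  let lines := (PySem.Str.split? content "\n").getD []   -- sep "\n" ≠ "": never none
  PySem.Str.join "\n" (lines.foldl pvStepA (true, [])).2

-- ===== PORT B =====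
-- per-line conversion used in B's comprehension
def pvConvB (l : String) : String :=
  if PySem.Str.startswith l "> " then
    "**" ++ PySem.Str.strip (PySem.Str.slice l (some 2) none) ++ "**\n"
  else l

def fix_title_blockquotes_alt (content : String) : String :=
  let lines := (PySem.Str.split? content "\n").getD []
  let idx := lines.findIdx (fun l => PySem.Str.startswith l "#")   -- next(enumerate …, len(lines))
  PySem.Str.join "\n" ((lines.take idx).map pvConvB ++ lines.drop idx)

-- ===== PRECONDITION & SPEC =====
def Spec_fix_title_blockquotes (content : String) (out : String) : Prop := out = fix_title_blockquotes_alt content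
instance (content : String) (out : String) : Decidable (Spec_fix_title_blockquotes content out) := by unfold Spec_fix_title_blockquotes; infer_instance

-- ===== CLAIM (what is proved, stated in full; the proofs are below) =====
def Claim_equal_fix_title_blockquotes : Prop := ∀ (content : String), Dom_fix_title_blockquotes content → Spec_fix_title_blockquotes content (fix_title_blockquotes content)

-- ===== LEMMAS AND PROOFS =====

-- A line starting with "> " does not start with "#".
lemma not_hash_of_gt (l : String) (h : PySem.Chars.startswith l.toList ['>', ' '] = true) :
    PySem.Chars.startswith l.toList ['#'] = false := by
  rcases (PySem.Chars.startswith_iff _ _).1 h with ⟨t, ht⟩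
  by_contra hc
  rcases (PySem.Chars.startswith_iff _ _).1 (by simpa using hc) with ⟨t', ht'⟩
  have h1 : l.toList.head? = some '>' := by rw [← ht]; rfl
  have h2 : l.toList.head? = some '#' := by rw [← ht']; rfl
  simp [h1] at h2

-- Once the flag is false, A's loop only appends the remaining lines unchanged.
lemma loopA_false (ls : List String) (acc : List String) :
    ls.foldl pvStepA (false, acc) = (false, acc ++ ls) := by
  induction ls generalizing acc with
  | nil => simp
  | cons l ls ih => simp [pvStepA, ih]

-- With the flag up, A's loop converts the prefix before the first '#' line and copies the rest.
lemma loopA_true (ls : List String) (acc : List String) :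
    (ls.foldl pvStepA (true, acc)).2
    = acc ++ ((ls.take (ls.findIdx (fun l => PySem.Str.startswith l "#"))).map pvConvB)
          ++ ls.drop (ls.findIdx (fun l => PySem.Str.startswith l "#")) := by
  induction ls generalizing acc with
  | nil => simp
  | cons l ls ih =>
    by_cases hq : PySem.Chars.startswith l.toList ['>', ' '] = true
    · have hh := not_hash_of_gt l hq
      simp [pvStepA, pvConvB, List.findIdx_cons, hq, hh, ih]
    · by_cases hh : PySem.Chars.startswith l.toList ['#'] = true
      · simp [pvStepA, List.findIdx_cons, hq, hh, loopA_false]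
      · simp [pvStepA, pvConvB, List.findIdx_cons, hq, hh, ih]

-- ===== VERDICT (by name: the statement is the Claim_ definition above) =====
theorem fix_title_blockquotes_spec : Claim_equal_fix_title_blockquotes := by
  intro content _
  show _ = _
  unfold fix_title_blockquotes fix_title_blockquotes_alt
  simp only [loopA_true, List.nil_append]
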